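-- pv_equiv track=rewrite | github.com/FloMorocco/CheckMess | GAME/chess_logic.py | compress_fen_row
-- ===== SOURCE A (Python) =====
-- def compress_fen_row(row):
--     compressed_row = ''
--     empty_count = 0
--     for char in row:
--         if char == ' ':
--             empty_count += 1
--         else:
--             if empty_count > 0:
--                 compressed_row += str(empty_count)
--                 empty_count = 0
--             compressed_row += char
--     if empty_count > 0:
--         compressed_row += str(empty_count)
--     return compressed_row
-- ===== SOURCE B (Python) =====
-- def compress_fen_row(row):
--     parts = []
--     i = 0
--     n = len(row)
--     while i < n:
--         j = i
--         while j < n and row[j] == row[i]: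
--             j += 1
--         k = j - i
--         parts.append(str(k) if row[i] == ' ' else row[i] * k)
--         i = j
--     return ''.join(parts)
-- ===== Notes on version B (the rewrite author's own statement) =====
-- stated objective: alternative
-- what changed: B scans the row run by run with two indices (a maximal run of identical characters per outer step), emitting str(k) for a space run and the character repeated k times otherwise, joining the parts at the end, instead of A's per-character accumulator with a pending empty counter flushed lazily.
import Mathlib
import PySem

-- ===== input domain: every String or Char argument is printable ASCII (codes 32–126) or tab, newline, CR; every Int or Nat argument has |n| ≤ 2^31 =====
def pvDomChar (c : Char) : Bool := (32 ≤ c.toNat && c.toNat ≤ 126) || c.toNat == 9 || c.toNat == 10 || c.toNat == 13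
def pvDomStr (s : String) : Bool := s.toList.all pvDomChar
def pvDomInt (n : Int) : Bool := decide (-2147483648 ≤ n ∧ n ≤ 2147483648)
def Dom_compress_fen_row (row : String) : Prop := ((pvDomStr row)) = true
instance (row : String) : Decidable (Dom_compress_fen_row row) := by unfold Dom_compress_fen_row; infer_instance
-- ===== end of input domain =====

-- B rewrites A's per-character accumulator loop as a run-by-run two-pointer scan (alternative decomposition, same cost).

-- ===== PORT A =====
-- A's for-loop over the characters, carrying (compressed_row, empty_count).
def pvALoop (cs : List Char) (acc : List Char) (cnt : Int) : List Char :=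
  match cs with
  | [] => if cnt > 0 then acc ++ (PySem.Int.toStr cnt).toList else acc
  | c :: rest =>
    if c = ' ' then pvALoop rest acc (cnt + 1)
    else pvALoop rest ((if cnt > 0 then acc ++ (PySem.Int.toStr cnt).toList else acc) ++ [c]) 0

def compress_fen_row (row : String) : String := String.mk (pvALoop row.toList [] 0)

-- ===== PORT B =====
-- B's outer while loop: each step consumes one maximal run (the inner 'while row[j] == row[i]'
-- is the takeWhile/dropWhile split) and appends one part; ''.join = flatten.
def pvBRuns (cs : List Char) : List (List Char) :=
  match cs with
  | [] => []
  | c :: rest =>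
    let k : Nat := (rest.takeWhile (· == c)).length + 1
    (if c = ' ' then (PySem.Int.toStr (k : Int)).toList else List.replicate k c)
      :: pvBRuns (rest.dropWhile (· == c))
termination_by cs.length
decreasing_by
  exact Nat.lt_succ_of_le (List.length_dropWhile_le _ _)

def compress_fen_row_alt (row : String) : String := String.mk (pvBRuns row.toList).flatten

-- ===== PRECONDITION & SPEC =====
def Spec_compress_fen_row (row : String) (out : String) : Prop := out = compress_fen_row_alt row
instance (row : String) (out : String) : Decidable (Spec_compress_fen_row row out) := by unfold Spec_compress_fen_row; infer_instance

-- ===== CLAIM (what is proved, stated in full; the proofs are below) =====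
def Claim_equal_compress_fen_row : Prop := ∀ (row : String), Dom_compress_fen_row row → Spec_compress_fen_row row (compress_fen_row row)

-- ===== LEMMAS AND PROOFS =====

-- Consuming a block of m spaces just increments the counter by m.
theorem pvALoop_spaces (m : Nat) (rest : List Char) (acc : List Char) (cnt : Int) :
    pvALoop (List.replicate m ' ' ++ rest) acc cnt = pvALoop rest acc (cnt + m) := by
  induction m generalizing cnt with
  | zero => simp
  | succ m ih =>
    simp only [List.replicate_succ, List.cons_append, pvALoop]
    have h1 : cnt + 1 + (m : Int) = cnt + ((m + 1 : Nat) : Int) := by push_cast; ring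
    rw [if_pos trivial, ih, h1]

-- Consuming a block of m copies of a non-space character with zero counter appends them.
theorem pvALoop_nonspaces (c : Char) (hc : c ≠ ' ') (m : Nat) (rest acc : List Char) :
    pvALoop (List.replicate m c ++ rest) acc 0 = pvALoop rest (acc ++ List.replicate m c) 0 := by
  induction m generalizing acc with
  | zero => simp
  | succ m ih =>
    simp only [List.replicate_succ, List.cons_append, pvALoop, if_neg hc]
    rw [if_neg (by omega), ih]
    simp

-- With a positive counter and the next character (if any) not a space, the counter flushes.
theorem pvALoop_flush (d acc : List Char) (cnt : Int) (hpos : cnt > 0)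
    (hd : ∀ e r, d = e :: r → e ≠ ' ') :
    pvALoop d acc cnt = pvALoop d (acc ++ (PySem.Int.toStr cnt).toList) 0 := by
  match d with
  | [] => simp [pvALoop, if_pos hpos]
  | e :: r =>
    have he : e ≠ ' ' := hd e r rfl
    simp [pvALoop, if_neg he, if_pos hpos]

theorem pv_head_dropWhile {α : Type} (p : α → Bool) (l : List α) (e : α) (r : List α)
    (h : l.dropWhile p = e :: r) : p e = false := by
  induction l with
  | nil => simp [List.dropWhile] at h
  | cons a t ih =>
    by_cases hp : p a = true
    · rw [List.dropWhile_cons_of_pos hp] at h; exact ih h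
    · rw [List.dropWhile_cons_of_neg hp] at h
      cases h; simpa using hp

theorem pv_takeWhile_replicate (c : Char) (l : List Char) :
    l.takeWhile (· == c) = List.replicate (l.takeWhile (· == c)).length c := by
  apply List.eq_replicate_of_mem
  intro b hb
  have := List.mem_takeWhile_imp hb
  simpa using this

-- Main invariant: A's loop from counter 0 produces acc ++ the flattened run parts of B.
theorem pv_main (cs acc : List Char) :
    pvALoop cs acc 0 = acc ++ (pvBRuns cs).flatten := by
  induction hn : cs.length using Nat.strong_induction_on generalizing cs acc with
  | _ n ih =>
  match cs with
  | [] => simp [pvALoop, pvBRuns]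
  | c :: rest =>
    have hsplit : rest = List.replicate (rest.takeWhile (· == c)).length c
        ++ rest.dropWhile (· == c) := by
      conv_lhs => rw [← List.takeWhile_append_dropWhile (p := (· == c)) (l := rest)]
      rw [← pv_takeWhile_replicate]
    set t := (rest.takeWhile (· == c)).length with ht
    set d := rest.dropWhile (· == c) with hdd
    have hdlen : d.length < n := by
      have h1 : d.length ≤ rest.length := List.length_dropWhile_le _ _
      simp only [← hn]; simp; omega
    have hruns : pvBRuns (c :: rest) =
        (if c = ' ' then (PySem.Int.toStr ((t + 1 : Nat) : Int)).toList
         else List.replicate (t + 1) c) :: pvBRuns d := by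
      rw [pvBRuns]
    by_cases hc : c = ' '
    · subst hc
      have : pvALoop (' ' :: rest) acc 0
          = pvALoop (List.replicate (t + 1) ' ' ++ d) acc 0 := by
        rw [List.replicate_succ, List.cons_append, ← hsplit]
      rw [this, pvALoop_spaces]
      have hdh : ∀ e r, d = e :: r → e ≠ ' ' := by
        intro e r hdr
        have := pv_head_dropWhile (· == ' ') rest e r (hdd ▸ hdr)
        simpa using this
      rw [pvALoop_flush d acc _ (by positivity) hdh]
      rw [ih d.length hdlen d _ rfl, hruns]
      simp
    · have : pvALoop (c :: rest) acc 0
          = pvALoop (List.replicate (t + 1) c ++ d) acc 0 := by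
        rw [List.replicate_succ, List.cons_append, ← hsplit]
      rw [this, pvALoop_nonspaces c hc, ih d.length hdlen d _ rfl, hruns]
      simp [if_neg hc]

-- ===== VERDICT (by name: the statement is the Claim_ definition above) =====
theorem compress_fen_row_spec : Claim_equal_compress_fen_row := by
  intro row _
  unfold Spec_compress_fen_row compress_fen_row compress_fen_row_alt
  rw [pv_main]
  simp
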